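-- pv_equiv track=rewrite | github.com/design4music/sni-platform | pipeline/freeze/generate_signal_rankings.py | merge_named_events
-- ===== SOURCE A (Python) =====
-- NAMED_EVENTS_MERGE = [
--     ["Davos / WEF", "Davos", "World Economic Forum", "WEF"],
-- ]
--
-- def merge_named_events(items):
--     """Merge duplicate named events into canonical entries."""
--     merged = []
--     used = set()
--     for group in NAMED_EVENTS_MERGE:
--         canonical = group[0]
--         aliases = set(group[1:])
--         total_count = 0
--         found = False
--         for value, count in items:
--             if value in aliases:
--                 total_count += count
--                 used.add(value)
--                 found = True
--         if found:
--             merged.append((canonical, total_count))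
--
--     # Add non-merged items
--     for value, count in items:
--         if value not in used:
--             merged.append((value, count))
--
--     # Re-sort by count descending
--     merged.sort(key=lambda x: x[1], reverse=True)
--     return merged
-- ===== SOURCE B (Python) =====
-- NAMED_EVENTS_MERGE = [
--     ["Davos / WEF", "Davos", "World Economic Forum", "WEF"],
-- ]
--
-- def merge_named_events(items):
--     """Merge duplicate named events into canonical entries (single indexed pass)."""
--     alias_to = {}
--     order = []
--     for group in NAMED_EVENTS_MERGE:
--         order.append(group[0])
--         for alias in group[1:]:
--             alias_to[alias] = group[0]
--     totals = {}
--     rest = []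
--     for value, count in items:
--         canon = alias_to.get(value)
--         if canon is None:
--             rest.append((value, count))
--         elif canon in totals:
--             totals[canon] += count
--         else:
--             totals[canon] = count
--     merged = [(c, totals[c]) for c in order if c in totals] + rest
--     merged.sort(key=lambda x: x[1], reverse=True)
--     return merged
-- ===== Notes on version B (the rewrite author's own statement) =====
-- stated objective: simpler
-- what changed: Replaces A's per-group scan over items plus a second scan filtered by a 'used' set with a single pass over items driven by an alias-to-canonical dict that accumulates per-canonical totals and collects non-merged items directly.
import Mathlib
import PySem

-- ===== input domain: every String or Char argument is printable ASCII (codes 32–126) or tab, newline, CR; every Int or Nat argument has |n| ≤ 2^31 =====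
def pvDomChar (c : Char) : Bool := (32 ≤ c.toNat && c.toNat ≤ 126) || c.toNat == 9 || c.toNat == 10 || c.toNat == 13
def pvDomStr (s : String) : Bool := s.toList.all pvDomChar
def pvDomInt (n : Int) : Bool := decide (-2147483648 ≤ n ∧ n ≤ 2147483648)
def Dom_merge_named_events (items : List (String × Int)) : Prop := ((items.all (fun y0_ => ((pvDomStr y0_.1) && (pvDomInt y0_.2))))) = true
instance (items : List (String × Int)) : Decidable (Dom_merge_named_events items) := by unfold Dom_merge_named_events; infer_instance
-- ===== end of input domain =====

-- B replaces A's per-group scan over items plus a second 'used'-set scan by one single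
-- pass over items driven by an alias→canonical index (objective: simpler).

-- ===== PORT A =====
def NAMED_EVENTS_MERGE : List (List String) := [["Davos / WEF", "Davos", "World Economic Forum", "WEF"]]

def merge_named_events (items : List (String × Int)) : List (String × Int) :=
  let st := NAMED_EVENTS_MERGE.foldl
    (fun (st : List (String × Int) × PySem.Set String) group =>
      -- group[0] never raises: every group of the constant is nonempty
      let canonical := (PySem.List.pyGet? group 0).getD ""
      let aliases : PySem.Set String := PySem.Set.ofList (PySem.List.slice group (some 1) none)
      let inner := items.foldl
        (fun (st2 : Int × PySem.Set String × Bool) vc =>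
          if PySem.Set.contains aliases vc.1 then
            (st2.1 + vc.2, PySem.Set.add st2.2.1 vc.1, true)
          else st2)
        (0, st.2, false)
      if inner.2.2 then (st.1 ++ [(canonical, inner.1)], inner.2.1) else (st.1, inner.2.1))
    ([], PySem.Set.empty)
  let merged := items.foldl
    (fun acc vc => if !(PySem.Set.contains st.2 vc.1) then acc ++ [vc] else acc) st.1
  PySem.List.sorted merged (fun x => x.2) true

-- ===== PORT B =====
-- alias→canonical index and canonical order, built once from the constant
def pvAliasIndex : PySem.Dict String String × List String :=
  NAMED_EVENTS_MERGE.foldl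
    (fun (st : PySem.Dict String String × List String) group =>
      let canon := (PySem.List.pyGet? group 0).getD ""
      ((PySem.List.slice group (some 1) none).foldl (fun d a => d.insert a canon) st.1,
       st.2 ++ [canon]))
    (PySem.Dict.empty, [])

def merge_named_events_alt (items : List (String × Int)) : List (String × Int) :=
  let alias_to := pvAliasIndex.1
  let order := pvAliasIndex.2
  let st := items.foldl
    (fun (st : PySem.Dict String Int × List (String × Int)) vc =>
      match alias_to.get? vc.1 with
      | none => (st.1, st.2 ++ [vc])
      | some canon =>
        if st.1.contains canon then (st.1.modify canon 0 (· + vc.2), st.2)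
        else (st.1.insert canon vc.2, st.2))
    (PySem.Dict.empty, [])
  let merged :=
    (order.filter (fun c => st.1.contains c)).map (fun c => (c, st.1.getD c 0)) ++ st.2
  PySem.List.sorted merged (fun x => x.2) true

-- ===== PRECONDITION & SPEC =====
def Spec_merge_named_events (items : List (String × Int)) (out : List (String × Int)) : Prop := out = merge_named_events_alt items
instance (items : List (String × Int)) (out : List (String × Int)) : Decidable (Spec_merge_named_events items out) := by unfold Spec_merge_named_events; infer_instance

-- ===== CLAIM (what is proved, stated in full; the proofs are below) =====
def Claim_equal_merge_named_events : Prop := ∀ (items : List (String × Int)), Dom_merge_named_events items → Spec_merge_named_events items (merge_named_events items)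

-- ===== LEMMAS AND PROOFS =====
def pvC0 : String := "Davos / WEF"
def pvAlias (v : String) : Bool := v == "Davos" || v == "World Economic Forum" || v == "WEF"
def pvTot (items : List (String × Int)) : Int := ((items.filter (fun vc => pvAlias vc.1)).map (·.2)).sum
def pvAny (items : List (String × Int)) : Bool := items.any (fun vc => pvAlias vc.1)
def pvRestL (items : List (String × Int)) : List (String × Int) := items.filter (fun vc => !pvAlias vc.1)
def pvVals (items : List (String × Int)) : List String := (items.filter (fun vc => pvAlias vc.1)).map (·.1)

theorem contAlias (v : String) : PySem.Set.contains (PySem.Set.ofList ["Davos", "World Economic Forum", "WEF"]) v = pvAlias v := by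
  have h : PySem.Set.ofList ["Davos", "World Economic Forum", "WEF"] = ["Davos", "World Economic Forum", "WEF"] := by decide
  rw [h]; simp only [pvAlias]
  by_cases h1 : v = "Davos" <;> by_cases h2 : v = "World Economic Forum" <;> by_cases h3 : v = "WEF" <;> simp_all

theorem A_inner (items : List (String × Int)) (t0 : Int) (u0 : PySem.Set String) (f0 : Bool) :
    items.foldl (fun (st2 : Int × PySem.Set String × Bool) vc =>
        if pvAlias vc.1 then (st2.1 + vc.2, PySem.Set.add st2.2.1 vc.1, true) else st2) (t0, u0, f0)
      = (t0 + pvTot items, PySem.Set.update u0 (pvVals items), f0 || pvAny items) := by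
  induction items generalizing t0 u0 f0 with
  | nil => simp [pvTot, pvVals, pvAny, PySem.Set.update]
  | cons vc rest ih =>
    by_cases h : pvAlias vc.1 = true
    · simp only [List.foldl_cons, h, if_true, ih, pvTot, pvVals, pvAny, List.filter_cons, List.any_cons]
      simp [PySem.Set.update_cons, add_assoc]
    · simp only [Bool.not_eq_true] at h
      simp only [List.foldl_cons, h, Bool.false_eq_true, if_false, ih, pvTot, pvVals, pvAny, List.filter_cons, List.any_cons]
      simp

theorem mem_vals (items : List (String × Int)) (vc : String × Int) (hm : vc ∈ items) :
    (vc.1 ∈ pvVals items) ↔ pvAlias vc.1 = true := by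
  constructor
  · intro h
    simp only [pvVals, List.mem_map, List.mem_filter] at h
    obtain ⟨p, ⟨_, hp⟩, he⟩ := h
    rwa [← he]
  · intro h
    simp only [pvVals, List.mem_map]
    exact ⟨vc, List.mem_filter.2 ⟨hm, h⟩, rfl⟩

theorem B_get (v : String) : (pvAliasIndex.1).get? v = if pvAlias v then some pvC0 else none := by
  have h : pvAliasIndex.1 = PySem.Dict.mk [("Davos", pvC0), ("World Economic Forum", pvC0), ("WEF", pvC0)] := by decide
  rw [h]
  simp only [PySem.Dict.get?_mk_cons, pvAlias]
  by_cases h1 : v = "Davos"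
  · subst h1; simp
  by_cases h2 : v = "World Economic Forum"
  · subst h2; simp
  by_cases h3 : v = "WEF"
  · subst h3; simp
  have b1 : (("Davos" : String) == v) = false := beq_eq_false_iff_ne.2 (fun e => h1 e.symm)
  have b2 : (("World Economic Forum" : String) == v) = false := beq_eq_false_iff_ne.2 (fun e => h2 e.symm)
  have b3 : (("WEF" : String) == v) = false := beq_eq_false_iff_ne.2 (fun e => h3 e.symm)
  have c1 : ((v : String) == "Davos") = false := beq_eq_false_iff_ne.2 h1
  have c2 : ((v : String) == "World Economic Forum") = false := beq_eq_false_iff_ne.2 h2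
  have c3 : ((v : String) == "WEF") = false := beq_eq_false_iff_ne.2 h3
  simp [b1, b2, b3, c1, c2, c3, PySem.Dict.get?]

theorem dict_modify_single (t0 c : Int) :
    (PySem.Dict.empty.insert pvC0 t0).modify pvC0 0 (· + c) = PySem.Dict.empty.insert pvC0 (t0 + c) := by
  apply PySem.Dict.ext
  simp [PySem.Dict.modify, PySem.Dict.insert, PySem.Dict.empty, PySem.Dict.contains, PySem.Dict.getD, PySem.Dict.get?]

theorem B_fold_ins (items : List (String × Int)) (t0 : Int) (r0 : List (String × Int)) :
    items.foldl (fun (st : PySem.Dict String Int × List (String × Int)) vc =>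
        match (pvAliasIndex.1).get? vc.1 with
        | none => (st.1, st.2 ++ [vc])
        | some canon =>
          if st.1.contains canon then (st.1.modify canon 0 (· + vc.2), st.2)
          else (st.1.insert canon vc.2, st.2)) (PySem.Dict.empty.insert pvC0 t0, r0)
      = (PySem.Dict.empty.insert pvC0 (t0 + pvTot items), r0 ++ pvRestL items) := by
  induction items generalizing t0 r0 with
  | nil => simp [pvTot, pvRestL]
  | cons vc rest ih =>
    rw [List.foldl_cons]
    by_cases h : pvAlias vc.1 = true
    · rw [show ((match (pvAliasIndex.1).get? vc.1 with
          | none => ((PySem.Dict.empty.insert pvC0 t0 : PySem.Dict String Int), r0 ++ [vc])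
          | some canon =>
            if (PySem.Dict.empty.insert pvC0 t0).contains canon then
              ((PySem.Dict.empty.insert pvC0 t0).modify canon 0 (· + vc.2), r0)
            else ((PySem.Dict.empty.insert pvC0 t0).insert canon vc.2, r0))
          = (PySem.Dict.empty.insert pvC0 (t0 + vc.2), r0)) by
        rw [B_get vc.1, if_pos h]
        simp [PySem.Dict.contains_insert_self, dict_modify_single]]
      rw [ih]
      simp [pvTot, pvRestL, h, add_assoc]
    · simp only [Bool.not_eq_true] at h
      rw [show ((match (pvAliasIndex.1).get? vc.1 with
          | none => ((PySem.Dict.empty.insert pvC0 t0 : PySem.Dict String Int), r0 ++ [vc])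
          | some canon =>
            if (PySem.Dict.empty.insert pvC0 t0).contains canon then
              ((PySem.Dict.empty.insert pvC0 t0).modify canon 0 (· + vc.2), r0)
            else ((PySem.Dict.empty.insert pvC0 t0).insert canon vc.2, r0))
          = (PySem.Dict.empty.insert pvC0 t0, r0 ++ [vc])) by
        rw [B_get vc.1, if_neg (by simp [h])]]
      rw [ih]
      simp [pvTot, pvRestL, h]

theorem B_fold_empty (items : List (String × Int)) (r0 : List (String × Int)) :
    items.foldl (fun (st : PySem.Dict String Int × List (String × Int)) vc =>
        match (pvAliasIndex.1).get? vc.1 with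
        | none => (st.1, st.2 ++ [vc])
        | some canon =>
          if st.1.contains canon then (st.1.modify canon 0 (· + vc.2), st.2)
          else (st.1.insert canon vc.2, st.2)) (PySem.Dict.empty, r0)
      = ((if pvAny items then PySem.Dict.empty.insert pvC0 (pvTot items) else PySem.Dict.empty), r0 ++ pvRestL items) := by
  induction items generalizing r0 with
  | nil => simp [pvAny, pvRestL]
  | cons vc rest ih =>
    rw [List.foldl_cons]
    by_cases h : pvAlias vc.1 = true
    · rw [show ((match (pvAliasIndex.1).get? vc.1 with
          | none => ((PySem.Dict.empty : PySem.Dict String Int), r0 ++ [vc])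
          | some canon =>
            if (PySem.Dict.empty : PySem.Dict String Int).contains canon then
              ((PySem.Dict.empty : PySem.Dict String Int).modify canon 0 (· + vc.2), r0)
            else ((PySem.Dict.empty : PySem.Dict String Int).insert canon vc.2, r0))
          = (PySem.Dict.empty.insert pvC0 vc.2, r0)) by
        rw [B_get vc.1, if_pos h]
        simp [PySem.Dict.contains_empty]]
      rw [B_fold_ins]
      simp [pvAny, pvTot, pvRestL, List.any_cons, h]
    · simp only [Bool.not_eq_true] at h
      rw [show ((match (pvAliasIndex.1).get? vc.1 with
          | none => ((PySem.Dict.empty : PySem.Dict String Int), r0 ++ [vc])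
          | some canon =>
            if (PySem.Dict.empty : PySem.Dict String Int).contains canon then
              ((PySem.Dict.empty : PySem.Dict String Int).modify canon 0 (· + vc.2), r0)
            else ((PySem.Dict.empty : PySem.Dict String Int).insert canon vc.2, r0))
          = (PySem.Dict.empty, r0 ++ [vc])) by
        rw [B_get vc.1, if_neg (by simp [h])]]
      rw [ih]
      simp [pvAny, pvTot, pvRestL, List.any_cons, h]
      simp only [h, Bool.false_or]
      rfl

theorem used_contains (items : List (String × Int)) (vc : String × Int) (hm : vc ∈ items) :
    PySem.Set.contains (PySem.Set.update PySem.Set.empty (pvVals items)) vc.1 = pvAlias vc.1 := by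
  have h : PySem.Set.contains (PySem.Set.update PySem.Set.empty (pvVals items)) vc.1 = true ↔ pvAlias vc.1 = true := by
    rw [PySem.Set.contains_iff, PySem.Set.mem_update]
    simp only [PySem.Set.empty, List.not_mem_nil, false_or]
    exact mem_vals items vc hm
  by_cases hb : pvAlias vc.1 = true
  · simp [hb]
    exact (mem_vals items vc hm).mpr hb
  · simp only [Bool.not_eq_true] at hb
    rw [hb]
    by_cases hc : PySem.Set.contains (PySem.Set.update PySem.Set.empty (pvVals items)) vc.1 = true
    · rw [h.1 hc] at hb; exact absurd hb (by simp)
    · simpa using hc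

theorem A_eq (items : List (String × Int)) :
    merge_named_events items
      = PySem.List.sorted ((if pvAny items then [(pvC0, pvTot items)] else []) ++ pvRestL items) (fun x => x.2) true := by
  unfold merge_named_events NAMED_EVENTS_MERGE
  simp only [List.foldl_cons, List.foldl_nil]
  rw [show ((PySem.List.pyGet? (["Davos / WEF", "Davos", "World Economic Forum", "WEF"] : List String) 0).getD "") = pvC0 from by decide]
  rw [show (PySem.List.slice (["Davos / WEF", "Davos", "World Economic Forum", "WEF"] : List String) (some 1) none) = ["Davos", "World Economic Forum", "WEF"] from by decide]
  simp only [contAlias]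
  rw [A_inner]
  simp only [Bool.false_or, zero_add]
  by_cases hb : pvAny items = true
  · simp only [hb, if_true]
    rw [PySem.List.foldl_append_if_eq_filter]
    rw [List.filter_congr (fun vc hm => by rw [used_contains items vc hm])]
    simp [pvRestL]
  · simp only [Bool.not_eq_true] at hb
    simp only [hb, Bool.false_eq_true, if_false]
    rw [PySem.List.foldl_append_if_eq_filter]
    rw [List.filter_congr (fun vc hm => by rw [used_contains items vc hm])]
    simp [pvRestL]

theorem B_eq (items : List (String × Int)) :
    merge_named_events_alt items
      = PySem.List.sorted ((if pvAny items then [(pvC0, pvTot items)] else []) ++ pvRestL items) (fun x => x.2) true := by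
  simp only [merge_named_events_alt]
  rw [B_fold_empty]
  rw [show pvAliasIndex.2 = [pvC0] from by decide]
  by_cases hb : pvAny items = true
  · simp [hb, PySem.Dict.contains_insert_self, PySem.Dict.getD_insert_self]
  · simp only [Bool.not_eq_true] at hb
    simp [hb]

-- ===== VERDICT (by name: the statement is the Claim_ definition above) =====
theorem merge_named_events_spec : Claim_equal_merge_named_events := by
  intro items _
  unfold Spec_merge_named_events
  rw [A_eq, B_eq]
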